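-- pv_equiv track=rewrite | github.com/geniuscynic/leetcode | pytyon/717. 1比特与2比特字符.py | isOneBitCharacter
-- ===== SOURCE A (Python) =====
-- def isOneBitCharacter(bits):
--
--     lens = len(bits)
--
--     if bits[-1] == 1:
--         return False
--
--     i= 0
--     index= -1
--     while i < lens:
--         if bits[i] == 1:
--             i += 1
--             index = i
--
--
--         i += 1
--
--
--     if index == lens - 1:
--         return False
--
--     return True
-- ===== SOURCE B (Python) =====
-- def isOneBitCharacter(bits):
--     if bits[-1] == 1:
--         return False
--     run = 0
--     for x in reversed(bits[:-1]):
--         if x != 1: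
--             break
--         run += 1
--     return run % 2 == 0
-- ===== Notes on version B (the rewrite author's own statement) =====
-- stated objective: simpler
-- what changed: Instead of decoding the whole list left-to-right with a two-variable index loop, B counts the trailing run of 1s before the last element backwards and returns whether its length is even.
import Mathlib
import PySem

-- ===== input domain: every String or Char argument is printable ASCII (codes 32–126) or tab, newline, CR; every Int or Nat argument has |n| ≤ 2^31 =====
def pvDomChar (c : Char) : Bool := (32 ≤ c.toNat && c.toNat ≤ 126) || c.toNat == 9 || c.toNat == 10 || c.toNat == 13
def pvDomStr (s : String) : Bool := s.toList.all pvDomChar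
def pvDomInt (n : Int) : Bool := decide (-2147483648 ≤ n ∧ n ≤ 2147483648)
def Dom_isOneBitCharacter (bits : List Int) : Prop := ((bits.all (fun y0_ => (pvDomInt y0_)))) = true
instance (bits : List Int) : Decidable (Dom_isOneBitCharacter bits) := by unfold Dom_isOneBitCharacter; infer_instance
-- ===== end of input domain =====

-- B replaces A's left-to-right decoding loop (index bookkeeping) by a backward count of the
-- trailing run of 1s before the last element, returning whether that run is even (simpler).

-- ===== PORT A =====
-- A's while loop: i and index are the two Python loop variables; the read at i is in range whenever
-- 0 ≤ i < lens, so pyGetD is exact there.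
def pvLoopA (bits : List Int) (lens i index : Int) : Int :=
  if i < lens then
    if PySem.List.pyGetD bits i 0 = 1 then
      pvLoopA bits lens (i + 1 + 1) (i + 1)
    else
      pvLoopA bits lens (i + 1) index
  else index
termination_by (lens - i).toNat
decreasing_by all_goals omega

def isOneBitCharacter (bits : List Int) : Bool :=
  let lens : Int := bits.length
  if PySem.List.pyGetD bits (-1) 0 = 1 then false
  else
    let index := pvLoopA bits lens 0 (-1)
    if index = lens - 1 then false else true

-- ===== PORT B =====
-- Source B: guard on the last element, then count 1s backwards over the reversed prefix until the first
-- non-1 (the for/break loop = length of takeWhile), and test the count's parity.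
def isOneBitCharacter_alt (bits : List Int) : Bool :=
  if PySem.List.pyGetD bits (-1) 0 = 1 then false
  else decide ((bits.dropLast.reverse.takeWhile (fun x => x == 1)).length % 2 = 0)

-- ===== PRECONDITION & SPEC =====
-- A indexes the last element first, which raises IndexError on the empty list; Pre_ excludes only that.
def Pre_isOneBitCharacter (bits : List Int) : Prop := bits ≠ []
instance (bits : List Int) : Decidable (Pre_isOneBitCharacter bits) := by
  unfold Pre_isOneBitCharacter; infer_instance

def pvWitness_isOneBitCharacter : List Int := [1, 0, 0]

def Spec_isOneBitCharacter (bits : List Int) (out : Bool) : Prop := out = isOneBitCharacter_alt bits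
instance (bits : List Int) (out : Bool) : Decidable (Spec_isOneBitCharacter bits out) := by
  unfold Spec_isOneBitCharacter; infer_instance

-- ===== CLAIM (what is proved, stated in full; the proofs are below) =====
def Claim_equal_isOneBitCharacter : Prop := ∀ (bits : List Int), Dom_isOneBitCharacter bits → Pre_isOneBitCharacter bits → Spec_isOneBitCharacter bits (isOneBitCharacter bits)

-- ===== LEMMAS AND PROOFS =====

-- trailing run of 1s, as B's port computes it
def pvRun (l : List Int) : Nat := (l.reverse.takeWhile (fun x => x == 1)).length

-- A's loop, abstracted to the suffix of the list it still has to read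
def pvG : List Int → Int → Int → Int
  | [], _, index => index
  | x :: rest, i, index =>
      if x = 1 then pvG (rest.drop 1) (i + 2) (i + 1) else pvG rest (i + 1) index
termination_by l => l.length
decreasing_by all_goals (simp only [List.length_drop, List.length_cons]; omega)

lemma pvRun_le (l : List Int) : pvRun l ≤ l.length := by
  have h := (List.takeWhile_sublist (l := l.reverse) (fun x => x == 1)).length_le
  simpa [pvRun] using h

lemma pvRun_cons (x : Int) (t : List Int) :
    pvRun (x :: t) = if x = 1 ∧ pvRun t = t.length then pvRun t + 1 else pvRun t := by
  simp only [pvRun, List.reverse_cons, List.takeWhile_append]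
  by_cases hfull : (t.reverse.takeWhile (fun x => x == 1)).length = t.length
  · by_cases hx : x = 1 <;> simp [hfull, hx]
  · have : ¬ ((t.reverse.takeWhile (fun x => x == 1)).length = t.reverse.length) := by
      simpa using hfull
    simp [hfull]

lemma pvRun_cons_ne {x : Int} (t : List Int) (hx : x ≠ 1) : pvRun (x :: t) = pvRun t := by
  simp [pvRun_cons, hx]

lemma pvRun_cons_cons_parity (y : Int) (s : List Int) :
    pvRun (1 :: y :: s) % 2 = pvRun s % 2 := by
  have h1 := pvRun_cons y s
  have h2 := pvRun_cons 1 (y :: s)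
  have hle := pvRun_le s
  rw [h1] at h2
  by_cases hy : y = 1 ∧ pvRun s = s.length
  · rw [if_pos hy] at h2
    rw [h2, if_pos ⟨rfl, by simp [hy.2]⟩]
    omega
  · rw [if_neg hy] at h2
    have hlt : pvRun s < (y :: s).length := by
      simp only [List.length_cons]
      by_cases hy1 : y = 1
      · have : pvRun s ≠ s.length := fun h => hy ⟨hy1, h⟩
        omega
      · omega
    rw [h2, if_neg (by rintro ⟨-, h⟩; omega)]

-- key invariant of A's loop: it lands exactly on the last position iff the trailing ones-run
-- before the last element is odd
lemma pvG_spec (n : Nat) : ∀ (l : List Int) (i index : Int), l.length ≤ n → l ≠ [] →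
    l.getLast? ≠ some 1 → index < i →
    (pvG l i index = i + l.length - 1 ↔ pvRun l.dropLast % 2 = 1) := by
  induction n with
  | zero => intro l i index hlen hne _ _; cases l <;> simp_all
  | succ n ih =>
    intro l i index hlen hne hlast hlt
    match l with
    | [x] =>
      have hx : x ≠ 1 := by simpa using hlast
      have hG : pvG [x] i index = index := by simp [pvG, hx]
      have hdl : ([x] : List Int).dropLast = [] := rfl
      rw [hG, hdl]
      constructor
      · intro h; exfalso; simp at h; omega
      · intro h; exfalso; simp [pvRun] at h
    | x :: y :: rest =>
      by_cases hx : x = 1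
      · subst hx
        cases rest with
        | nil =>
          have hG : pvG [1, y] i index = i + 1 := by simp [pvG]
          have hdl : ([1, y] : List Int).dropLast = [1] := rfl
          have hrun : pvRun ([1] : List Int) = 1 := by simp [pvRun, List.takeWhile]
          rw [hG, hdl, hrun]
          constructor
          · intro _; rfl
          · intro _; simp; omega
        | cons z rest' =>
          have hlast' : (z :: rest').getLast? ≠ some 1 := by
            simpa [List.getLast?_cons_cons] using hlast
          have hrec := ih (z :: rest') (i + 2) (i + 1)
            (by simp at hlen ⊢; omega) (by simp) hlast' (by omega)
          have hG : pvG (1 :: y :: z :: rest') i index = pvG (z :: rest') (i + 2) (i + 1) := by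
            simp [pvG]
          have hdl : (1 :: y :: z :: rest').dropLast = 1 :: y :: (z :: rest').dropLast := by simp
          have harith : i + ((1 :: y :: z :: rest').length : Int) - 1
              = (i + 2) + (((z :: rest').length : Int)) - 1 := by
            simp [List.length_cons]; ring
          rw [hG, harith, hdl, pvRun_cons_cons_parity]
          exact hrec
      · have hlast' : (y :: rest).getLast? ≠ some 1 := by
          simpa [List.getLast?_cons_cons] using hlast
        have hrec := ih (y :: rest) (i + 1) index
          (by simp at hlen ⊢; omega) (by simp) hlast' (by omega)
        have hG : pvG (x :: y :: rest) i index = pvG (y :: rest) (i + 1) index := by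
          simp [pvG, hx]
        have hdl : (x :: y :: rest).dropLast = x :: (y :: rest).dropLast := by simp
        have harith : i + ((x :: y :: rest).length : Int) - 1
            = (i + 1) + (((y :: rest).length : Int)) - 1 := by
          simp [List.length_cons]; ring
        rw [hG, harith, hdl, pvRun_cons_ne _ hx]
        exact hrec

-- the index loop reads exactly the suffix of bits it has not yet passed
lemma pvLoopA_eq_pvG (bits : List Int) : ∀ (i index : Int), 0 ≤ i →
    pvLoopA bits (bits.length : Int) i index = pvG (bits.drop i.toNat) i index := by
  intro i index hi
  induction hn : ((bits.length : Int) - i).toNat using Nat.strong_induction_on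
    generalizing i index with
  | _ n ihn =>
  subst hn
  rw [pvLoopA]
  by_cases hlt : i < (bits.length : Int)
  · have hnat : i.toNat < bits.length := by omega
    rw [List.drop_eq_getElem_cons hnat]
    have hget : PySem.List.pyGetD bits i 0 = bits[i.toNat] :=
      PySem.List.pyGetD_eq_getElem bits 0 hi (by omega)
    by_cases hb : bits[i.toNat] = (1 : Int)
    · rw [if_pos hlt, if_pos (by rw [hget]; exact hb)]
      have hGr : pvG (bits[i.toNat] :: List.drop (i.toNat + 1) bits) i index
          = pvG (List.drop (i.toNat + 1 + 1) bits) (i + 2) (i + 1) := by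
        simp [pvG, hb]
      rw [hGr]
      have h2 : (i + 1 + 1).toNat = i.toNat + 1 + 1 := by omega
      have hrec := ihn ((bits.length : Int) - (i + 1 + 1)).toNat (by omega) (i + 1 + 1) (i + 1)
        (by omega) rfl
      rw [hrec, h2]
      have e : i + 1 + 1 = i + 2 := by ring
      rw [e]
    · rw [if_pos hlt, if_neg (by rw [hget]; exact hb)]
      have hGr : pvG (bits[i.toNat] :: List.drop (i.toNat + 1) bits) i index
          = pvG (List.drop (i.toNat + 1) bits) (i + 1) index := by
        simp only [pvG]
        rw [if_neg hb]
      rw [hGr]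
      have h1 : (i + 1).toNat = i.toNat + 1 := by omega
      have hrec := ihn ((bits.length : Int) - (i + 1)).toNat (by omega) (i + 1) index
        (by omega) rfl
      rw [hrec, h1]
  · rw [if_neg hlt]
    have : bits.drop i.toNat = [] := List.drop_eq_nil_of_le (by omega)
    rw [this, pvG]

-- ===== VERDICT (by name: the statement is the Claim_ definition above) =====
theorem isOneBitCharacter_spec : Claim_equal_isOneBitCharacter := by
  intro bits _ hpre
  unfold Spec_isOneBitCharacter isOneBitCharacter isOneBitCharacter_alt
  have hne : bits ≠ [] := hpre
  rw [PySem.List.pyGetD_neg_one bits 0 hne]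
  by_cases hlast : bits.getLast hne = 1
  · simp [hlast]
  · rw [if_neg hlast, if_neg hlast]
    have hlast? : bits.getLast? ≠ some 1 := by
      rw [List.getLast?_eq_some_getLast hne]
      simpa using hlast
    have hloop := pvLoopA_eq_pvG bits 0 (-1) le_rfl
    simp only [Int.toNat_zero, List.drop_zero] at hloop
    have hkey := pvG_spec bits.length bits 0 (-1) le_rfl hne hlast? (by omega)
    rw [hloop]
    have hmod : pvRun bits.dropLast % 2 = 0 ∨ pvRun bits.dropLast % 2 = 1 := by omega
    by_cases hodd : pvRun bits.dropLast % 2 = 1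
    · rw [if_pos (by rw [hkey.mpr hodd]; ring)]
      simp [pvRun] at hodd ⊢
      omega
    · have hne' : pvG bits 0 (-1) ≠ (bits.length : Int) - 1 := by
        intro h
        exact hodd (hkey.mp (by rw [h]; ring))
      rw [if_neg hne']
      simp [pvRun] at hodd ⊢
      omega
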